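-- pv_equiv track=rewrite | github.com/caokyhieu/Inspectorio_Duration | source/predict.py | preprocessCategory
-- ===== SOURCE A (Python) =====
-- def preprocessCategory(cat_str):
--     cat_rst = cat_str.lower()
--     cat_array = cat_rst.split(',')
--     cat_result = []
--     for v in cat_array:
--         v = v.strip()
--         v = v.rstrip('s')
--         if 'boot' in v:
--             v = 'boot'
--         elif 'crew' in v:
--             v = 'crew'
--         cat_result.append(v)
--     return cat_result[0]
-- ===== SOURCE B (Python) =====
-- def preprocessCategory(cat_str):
--     s = cat_str.lower()
--     n = len(s)
--     j = 0
--     while j < n and s[j] != ',':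
--         j += 1
--     i = 0
--     while i < j and s[i].isspace():
--         i += 1
--     while j > i and s[j - 1].isspace():
--         j -= 1
--     while j > i and s[j - 1] == 's':
--         j -= 1
--     if _find_in(s, i, j, 'boot'):
--         return 'boot'
--     if _find_in(s, i, j, 'crew'):
--         return 'crew'
--     return s[i:j]
--
--
-- def _find_in(s, i, j, pat):
--     m = len(pat)
--     a = i
--     while a < j - m + 1:
--         if s[a:a + m] == pat:
--             return True
--         a += 1
--     return False
-- ===== Notes on version B (the rewrite author's own statement) =====
-- stated objective: alternative
-- what changed: B drops A's split/strip/rstrip token pipeline (and its loop over all tokens) and instead works on the lowered string with index arithmetic: it locates the first comma, trims whitespace and trailing 's' with two-pointer index loops, and detects 'boot'/'crew' with an in-place sliding-window scan, slicing the answer out only at the end.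
import Mathlib
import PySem

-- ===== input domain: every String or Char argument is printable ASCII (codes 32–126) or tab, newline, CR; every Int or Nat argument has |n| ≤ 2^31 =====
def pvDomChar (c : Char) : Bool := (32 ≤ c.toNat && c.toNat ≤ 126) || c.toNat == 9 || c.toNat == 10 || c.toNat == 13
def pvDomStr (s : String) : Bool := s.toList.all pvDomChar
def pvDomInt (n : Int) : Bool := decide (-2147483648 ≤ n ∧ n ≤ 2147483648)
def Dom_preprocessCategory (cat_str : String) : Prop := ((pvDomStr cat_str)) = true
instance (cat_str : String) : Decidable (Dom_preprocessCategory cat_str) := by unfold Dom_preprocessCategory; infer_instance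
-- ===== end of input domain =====

-- B replaces A's split/strip/rstrip token pipeline by index arithmetic on the lowered string
-- (two-pointer trimming and an in-place window substring scan); objective: alternative decomposition.

-- ===== PORT A =====
-- s.rstrip('s') ported by hand (PySem.Chars.rstrip strips whitespace only):
-- drop trailing 's' characters — exact for a single-char strip set.
def pyRstripS (cs : List Char) : List Char := (cs.reverse.dropWhile (· == 's')).reverse

def preprocessCategory (cat_str : String) : String :=
  let cat_rst := PySem.Str.lower cat_str
  let cat_array := PySem.Chars.splitOn cat_rst.toList [',']
  let cat_result := cat_array.foldl (fun acc v =>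
      let v1 := PySem.Chars.strip v
      let v2 := pyRstripS v1
      let v3 := if PySem.Chars.isIn ['b','o','o','t'] v2 then ['b','o','o','t']
        else if PySem.Chars.isIn ['c','r','e','w'] v2 then ['c','r','e','w'] else v2
      acc ++ [v3]) []
  -- cat_result[0]: split always returns at least one piece, so index 0 is always in range
  String.ofList (PySem.List.pyGetD cat_result 0 [])

-- ===== PORT B =====
-- while j < n and s[j] != ',': j += 1
def pvFindComma (s : List Char) (j : Nat) : Nat :=
  if h : j < s.length ∧ ¬ (s.getD j ' ' = ',') then pvFindComma s (j + 1) else j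
termination_by s.length - j
decreasing_by omega

-- while i < j and s[i].isspace(): i += 1
def pvSkipWs (s : List Char) (i j : Nat) : Nat :=
  if h : i < j ∧ PySem.Chars.isspace (s.getD i ' ') then pvSkipWs s (i + 1) j else i
termination_by j - i
decreasing_by omega

-- while j > i and p(s[j-1]): j -= 1   (used once with isspace, once with == 's')
def pvTrimRight (s : List Char) (p : Char → Bool) (i j : Nat) : Nat :=
  if h : i < j ∧ p (s.getD (j - 1) ' ') then pvTrimRight s p i (j - 1) else j
termination_by j
decreasing_by omega

-- while a < j - m + 1: if s[a:a+m] == pat: return True; a += 1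
def pvFindLoop (s pat : List Char) (a : Nat) (ub : Int) : Bool :=
  if h : (a : Int) < ub then
    (if (s.drop a).take pat.length = pat then true else pvFindLoop s pat (a + 1) ub)
  else false
termination_by (ub - a).toNat
decreasing_by omega

def pvFindIn (s : List Char) (i j : Nat) (pat : List Char) : Bool :=
  pvFindLoop s pat i ((j : Int) - pat.length + 1)

def preprocessCategory_alt (cat_str : String) : String :=
  let s := PySem.Chars.lower cat_str.toList
  let j0 := pvFindComma s 0
  let i := pvSkipWs s 0 j0
  let j1 := pvTrimRight s PySem.Chars.isspace i j0
  let j := pvTrimRight s (· == 's') i j1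
  if pvFindIn s i j ['b','o','o','t'] then "boot"
  else if pvFindIn s i j ['c','r','e','w'] then "crew"
  else String.ofList (PySem.List.slice s (some (i : Int)) (some (j : Int)))

-- ===== PRECONDITION & SPEC =====
def Spec_preprocessCategory (cat_str : String) (out : String) : Prop := out = preprocessCategory_alt cat_str
instance (cat_str : String) (out : String) : Decidable (Spec_preprocessCategory cat_str out) := by unfold Spec_preprocessCategory; infer_instance

-- ===== CLAIM (what is proved, stated in full; the proofs are below) =====
def Claim_equal_preprocessCategory : Prop := ∀ (cat_str : String), Dom_preprocessCategory cat_str → Spec_preprocessCategory cat_str (preprocessCategory cat_str)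

-- ===== LEMMAS AND PROOFS =====

-- the per-token normalisation A applies (proof-only abbreviation)
def pvNormA (t : List Char) : List Char :=
  let v1 := PySem.Chars.strip t
  let v2 := pyRstripS v1
  if PySem.Chars.isIn ['b','o','o','t'] v2 then ['b','o','o','t']
  else if PySem.Chars.isIn ['c','r','e','w'] v2 then ['c','r','e','w'] else v2

-- ---- A-side: the first piece of split(',') is the takeWhile prefix ----

lemma splitOn_go_head_acc (sep : List Char) :
    ∀ (fuel : Nat) (l cur : List Char) (acc : List (List Char)) (a0 : List Char),
      (PySem.Chars.splitOn.go sep fuel l cur (acc ++ [a0])).headD [] = a0 := by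
  intro fuel
  induction fuel with
  | zero => intro l cur acc a0; simp [PySem.Chars.splitOn.go]
  | succ n ih =>
    intro l cur acc a0
    cases l with
    | nil => simp [PySem.Chars.splitOn.go]
    | cons c rest =>
      rw [PySem.Chars.splitOn.go]
      split
      · have := ih (List.drop sep.length (c :: rest)) [] (cur.reverse :: acc) a0
        simpa using this
      · exact ih rest (c :: cur) acc a0

lemma splitOn_go_head : ∀ (fuel : Nat),
    ∀ (l cur : List Char), l.length < fuel →
      (PySem.Chars.splitOn.go [','] fuel l cur []).headD []
        = cur.reverse ++ l.takeWhile (fun c => !(c == ',')) := by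
  intro fuel
  induction fuel with
  | zero => intro l cur h; omega
  | succ n ih =>
    intro l cur h
    cases l with
    | nil => simp [PySem.Chars.splitOn.go]
    | cons c rest =>
      rw [PySem.Chars.splitOn.go]
      by_cases hc : c = ','
      · subst hc
        simp only [List.isPrefixOf, List.takeWhile]
        have h1 := splitOn_go_head_acc [','] n rest [] [] cur.reverse
        simp only [List.nil_append] at h1
        simpa [List.headD] using h1
      · have hpre : List.isPrefixOf [','] (c :: rest) = false := by
          simp [List.isPrefixOf]
          exact fun hh => hc hh.symm
        rw [if_neg (by simp [hpre])]
        rw [ih rest (c :: cur) (by simpa using Nat.lt_of_succ_lt_succ h)]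
        have hb : (c == ',') = false := by simp [hc]
        simp [List.takeWhile, hb]

lemma splitOn_go_ne_nil (sep : List Char) (fuel : Nat) :
    ∀ (l cur : List Char) (acc : List (List Char)),
      PySem.Chars.splitOn.go sep fuel l cur acc ≠ [] := by
  induction fuel with
  | zero => intro l cur acc; simp [PySem.Chars.splitOn.go]
  | succ n ih =>
    intro l cur acc
    cases l with
    | nil => simp [PySem.Chars.splitOn.go]
    | cons c rest =>
      rw [PySem.Chars.splitOn.go]
      split
      · exact ih _ _ _
      · exact ih _ _ _

lemma splitOn_ne_nil (s sep : List Char) : PySem.Chars.splitOn s sep ≠ [] := by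
  unfold PySem.Chars.splitOn
  exact splitOn_go_ne_nil _ _ _ _ _

lemma splitOn_head (s : List Char) :
    (PySem.Chars.splitOn s [',']).headD [] = s.takeWhile (fun c => !(c == ',')) := by
  unfold PySem.Chars.splitOn
  simpa using splitOn_go_head (s.length + 1) s [] (by omega)

-- ---- B-side: closed forms for the four index loops ----

lemma pvFindComma_eq (s : List Char) :
    ∀ j, j ≤ s.length →
      pvFindComma s j = j + ((s.drop j).takeWhile (fun c => !(c == ','))).length := by
  intro j hj
  fun_induction pvFindComma s j with
  | case1 j h ih =>
    rw [List.drop_eq_getElem_cons h.1]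
    have hg : s[j] = s.getD j ' ' := by simp [List.getD, List.getElem?_eq_getElem h.1]
    have hne : (s.getD j ' ' == ',') = false := by simpa using h.2
    rw [List.takeWhile]
    simp only [hg, hne]
    rw [ih (by omega)]
    simp; omega
  | case2 j h =>
    rcases Nat.lt_or_ge j s.length with hlt | hge
    · have : s.getD j ' ' = ',' := by tauto
      rw [List.drop_eq_getElem_cons hlt, List.takeWhile]
      have hg : s[j] = s.getD j ' ' := by simp [List.getD, List.getElem?_eq_getElem hlt]
      simp only [hg, this]
      norm_num
    · have : s.drop j = [] := List.drop_eq_nil_of_le hge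
      simp [this]

lemma pvSkipWs_eq (s : List Char) :
    ∀ i j, i ≤ j → j ≤ s.length →
      pvSkipWs s i j = i + (((s.take j).drop i).takeWhile PySem.Chars.isspace).length := by
  intro i j hij hj
  fun_induction pvSkipWs s i j with
  | case1 i h ih =>
    have hlt : i < s.length := by omega
    have hd : (s.take j).drop i = s[i] :: (s.take j).drop (i+1) := by
      rw [List.drop_eq_getElem_cons (by simp; omega)]
      simp [List.getElem_take]
    have hg : s[i] = s.getD i ' ' := by simp [List.getD, List.getElem?_eq_getElem hlt]
    rw [hd, List.takeWhile]
    simp only [hg, h.2]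
    rw [ih (by omega)]
    simp; omega
  | case2 i h =>
    rcases Nat.lt_or_ge i j with hlt | hge
    · have hlt' : i < s.length := by omega
      have hd : (s.take j).drop i = s[i] :: (s.take j).drop (i+1) := by
        rw [List.drop_eq_getElem_cons (by simp; omega)]
        simp [List.getElem_take]
      have hg : s[i] = s.getD i ' ' := by simp [List.getD, List.getElem?_eq_getElem hlt']
      have hns : PySem.Chars.isspace (s.getD i ' ') = false := by
        by_contra hc
        exact h ⟨hlt, by simpa using hc⟩
      rw [hd, List.takeWhile]
      simp only [hg, hns]
      simp
    · have : (s.take j).drop i = [] := List.drop_eq_nil_of_le (by simp; omega)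
      simp [this]

lemma seg_concat (s : List Char) (i j : Nat) (hij : i < j) (hj : j ≤ s.length) :
    (s.take j).drop i = ((s.take (j-1)).drop i) ++ [s[j-1]'(by omega)] := by
  have h1 : j - 1 + 1 = j := by omega
  have h2 : s.take j = s.take (j-1) ++ [s[j-1]'(by omega)] := by
    conv_lhs => rw [← h1, List.take_add_one]
    simp [List.getElem?_eq_getElem (by omega : j - 1 < s.length)]
  rw [h2, List.drop_append_of_le_length (by simp; omega)]

lemma pvTrimRight_eq (s : List Char) (p : Char → Bool) :
    ∀ j i, i ≤ j → j ≤ s.length →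
      pvTrimRight s p i j = i + ((((s.take j).drop i).reverse.dropWhile p).reverse).length := by
  intro j i hij hj
  fun_induction pvTrimRight s p i j with
  | case1 j h ih =>
    have hlt : j - 1 < s.length := by omega
    have hg : s[j-1]'hlt = s.getD (j-1) ' ' := by simp [List.getD, List.getElem?_eq_getElem hlt]
    rw [seg_concat s i j h.1 hj]
    rw [List.reverse_append]
    simp only [List.reverse_singleton, List.singleton_append, List.dropWhile]
    rw [hg, h.2]
    rw [ih (by omega) (by omega)]
  | case2 j h =>
    rcases Nat.lt_or_ge i j with hlt | hge
    · have hlt' : j - 1 < s.length := by omega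
      have hg : s[j-1]'hlt' = s.getD (j-1) ' ' := by simp [List.getD, List.getElem?_eq_getElem hlt']
      have hnp : p (s.getD (j-1) ' ') = false := by
        by_contra hc
        exact h ⟨hlt, by simpa using hc⟩
      rw [seg_concat s i j hlt hj]
      rw [List.reverse_append]
      simp only [List.reverse_singleton, List.singleton_append, List.dropWhile]
      rw [hg, hnp]
      simp
      omega
    · have hji : j = i := by omega
      subst hji
      simp

lemma pvFindLoop_iff (s pat : List Char) :
    ∀ (ub : Int) (a : Nat),
      pvFindLoop s pat a ub = true ↔
        ∃ b : Nat, a ≤ b ∧ (b : Int) < ub ∧ (s.drop b).take pat.length = pat := by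
  intro ub a
  fun_induction pvFindLoop s pat a ub with
  | case1 a h hm =>
    simp only []
    constructor
    · intro _; exact ⟨a, le_refl a, h, hm⟩
    · intro _; trivial
  | case2 a h hm ih =>
    rw [ih]
    constructor
    · rintro ⟨b, hb1, hb2, hb3⟩; exact ⟨b, by omega, hb2, hb3⟩
    · rintro ⟨b, hb1, hb2, hb3⟩
      refine ⟨b, ?_, hb2, hb3⟩
      rcases Nat.eq_or_lt_of_le hb1 with he | hl
      · subst he; exact absurd hb3 (by simpa using hm)
      · omega
  | case3 a h =>
    constructor
    · intro hh; exact absurd hh (by simp)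
    · rintro ⟨b, hb1, hb2, _⟩
      exfalso
      have : (a : Int) ≤ (b : Int) := by exact_mod_cast hb1
      omega

lemma pvFindIn_eq_isIn (s : List Char) (i j : Nat) (pat : List Char)
    (hij : i ≤ j) (hj : j ≤ s.length) (hpat : pat ≠ []) :
    pvFindIn s i j pat = PySem.Chars.isIn pat ((s.take j).drop i) := by
  unfold pvFindIn
  rw [Bool.eq_iff_iff, pvFindLoop_iff]
  rw [← PySem.Chars.exists_prefix_drop_iff_isIn]
  constructor
  · rintro ⟨b, hb1, hb2, hb3⟩
    have hbm : b + pat.length ≤ j := by omega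
    refine ⟨b - i, ?_⟩
    have hseg : ((s.take j).drop i).drop (b - i) = (s.drop b).take (j - b) := by
      rw [List.drop_drop]
      have h2 : i + (b - i) = b := by omega
      rw [h2, List.drop_take]
    rw [hseg]
    rw [List.prefix_take_iff]
    constructor
    · exact List.prefix_iff_eq_take.mpr hb3.symm
    · have : pat.length = ((s.drop b).take pat.length).length := by rw [hb3]
      simp at this
      omega
  · rintro ⟨k, hk⟩
    have hkl : k < ((s.take j).drop i).length := by
      by_contra hge
      have : ((s.take j).drop i).drop k = [] := List.drop_eq_nil_of_le (by omega)
      rw [this] at hk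
      exact hpat (List.prefix_nil.mp hk)
    have hsl : ((s.take j).drop i).length = j - i := by simp; omega
    refine ⟨i + k, by omega, ?_, ?_⟩
    · have hb : i + k < j := by omega
      have hseg : ((s.take j).drop i).drop k = (s.drop (i + k)).take (j - (i + k)) := by
        rw [List.drop_drop, List.drop_take]
      rw [hseg, List.prefix_take_iff] at hk
      have : (i + k : Int) + pat.length ≤ j := by
        have := hk.2
        omega
      omega
    · have hseg : ((s.take j).drop i).drop k = (s.drop (i + k)).take (j - (i + k)) := by
        rw [List.drop_drop, List.drop_take]
      rw [hseg, List.prefix_take_iff] at hk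
      exact (List.prefix_iff_eq_take.mp hk.1).symm

-- ---- the two ports against the common normal form ----

lemma A_eq (c : String) :
    preprocessCategory c
      = String.ofList (pvNormA ((PySem.Chars.lower c.toList).takeWhile (fun ch => !(ch == ',')))) := by
  unfold preprocessCategory
  have hls : (PySem.Str.lower c).toList = PySem.Chars.lower c.toList := by simp
  cases h : PySem.Chars.splitOn (PySem.Str.lower c).toList [','] with
  | nil => exact absurd h (splitOn_ne_nil _ _)
  | cons x rest =>
    have hx : x = (PySem.Chars.lower c.toList).takeWhile (fun ch => !(ch == ',')) := by
      have h0 := splitOn_head (PySem.Str.lower c).toList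
      rw [h, hls] at h0
      simpa [List.headD] using h0
    simp only [h, PySem.List.foldl_append_singleton_eq_map, List.nil_append, List.map_cons]
    simp only [PySem.List.pyGetD, PySem.List.pyGet?, PySem.List.pyIdx?]
    norm_num
    rw [hx]
    simp only [pvNormA]

lemma drop_length_takeWhile (p : Char → Bool) (l : List Char) :
    l.drop (l.takeWhile p).length = l.dropWhile p := by
  induction l with
  | nil => simp
  | cons a t ih =>
    by_cases hp : p a <;> simp [hp, ih]

lemma rev_dropWhile_rev_prefix (p : Char → Bool) (l : List Char) :
    (l.reverse.dropWhile p).reverse <+: l := by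
  have hsuf : l.reverse.dropWhile p <:+ l.reverse := List.dropWhile_suffix _
  have := List.reverse_prefix.mpr hsuf
  simpa using this

lemma B_eq (c : String) :
    preprocessCategory_alt c
      = String.ofList (pvNormA ((PySem.Chars.lower c.toList).takeWhile (fun ch => !(ch == ',')))) := by
  simp only [preprocessCategory_alt]
  set s := PySem.Chars.lower c.toList with hs
  set tok := s.takeWhile (fun ch => !(ch == ',')) with htok
  have htokpre : s.take tok.length = tok := (List.prefix_iff_eq_take.mp (List.takeWhile_prefix _)).symm
  have hj0len : tok.length ≤ s.length := (List.takeWhile_prefix _).length_le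
  have hj0 : pvFindComma s 0 = tok.length := by
    rw [pvFindComma_eq s 0 (by omega)]
    simp [htok]
  set iw := (tok.takeWhile PySem.Chars.isspace).length with hiw
  have hiwle : iw ≤ tok.length := by rw [hiw]; exact (List.takeWhile_prefix _).length_le
  have hi : pvSkipWs s 0 tok.length = iw := by
    rw [pvSkipWs_eq s 0 tok.length (by omega) hj0len]
    rw [List.drop_zero, htokpre, ← hiw]
    omega
  set x := tok.drop iw with hxdef
  have hxeq : x = List.dropWhile PySem.Chars.isspace tok := by
    rw [hxdef, hiw, drop_length_takeWhile]
  have hxlen : x.length = tok.length - iw := by rw [hxdef]; simp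
  set y := (x.reverse.dropWhile PySem.Chars.isspace).reverse with hydef
  have hyx : y <+: x := by rw [hydef]; exact rev_dropWhile_rev_prefix _ _
  have hylen : y.length ≤ x.length := hyx.length_le
  have hj1sle : iw + y.length ≤ tok.length := by omega
  have hj1 : pvTrimRight s PySem.Chars.isspace iw tok.length = iw + y.length := by
    rw [pvTrimRight_eq s _ tok.length iw hiwle hj0len]
    rw [htokpre, ← hxdef, ← hydef]
  have hseg2 : (s.take (iw + y.length)).drop iw = y := by
    have h2 : s.take (iw + y.length) = (s.take tok.length).take (iw + y.length) := by
      rw [List.take_take, min_eq_left hj1sle]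
    rw [h2, htokpre, List.drop_take, ← hxdef]
    have h3 : iw + y.length - iw = y.length := by omega
    rw [h3]
    exact (List.prefix_iff_eq_take.mp hyx).symm
  set v := (y.reverse.dropWhile (· == 's')).reverse with hvdef
  have hvy : v <+: y := by rw [hvdef]; exact rev_dropWhile_rev_prefix _ _
  have hvlen : v.length ≤ y.length := hvy.length_le
  have hj2 : pvTrimRight s (· == 's') iw (iw + y.length) = iw + v.length := by
    rw [pvTrimRight_eq s _ (iw + y.length) iw (by omega) (by omega)]
    rw [hseg2, ← hvdef]
  have hseg3 : (s.take (iw + v.length)).drop iw = v := by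
    have h2 : s.take (iw + v.length) = (s.take (iw + y.length)).take (iw + v.length) := by
      rw [List.take_take, min_eq_left (by omega)]
    rw [h2, List.drop_take, hseg2]
    have h3 : iw + v.length - iw = v.length := by omega
    rw [h3]
    exact (List.prefix_iff_eq_take.mp hvy).symm
  have hfb : pvFindIn s iw (iw + v.length) ['b','o','o','t']
      = PySem.Chars.isIn ['b','o','o','t'] v := by
    rw [pvFindIn_eq_isIn s iw _ _ (by omega) (by omega) (by simp), hseg3]
  have hfc : pvFindIn s iw (iw + v.length) ['c','r','e','w']
      = PySem.Chars.isIn ['c','r','e','w'] v := by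
    rw [pvFindIn_eq_isIn s iw _ _ (by omega) (by omega) (by simp), hseg3]
  have hslice : PySem.List.slice s (some (iw : Int)) (some ((iw + v.length : Nat) : Int)) = v := by
    rw [PySem.List.slice_natCast, ← List.drop_take, hseg3]
  rw [hj0, hi, hj1, hj2, hfb, hfc, hslice]
  have hnorm : pvNormA tok
      = (if PySem.Chars.isIn ['b','o','o','t'] v then ['b','o','o','t']
         else if PySem.Chars.isIn ['c','r','e','w'] v then ['c','r','e','w'] else v) := by
    simp only [pvNormA, PySem.Chars.strip, PySem.Chars.lstrip, PySem.Chars.rstrip]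
    rw [← hxeq, ← hydef]
    rw [pyRstripS, ← hvdef]
  rw [hnorm]
  split_ifs <;> rfl

-- ===== VERDICT (by name: the statement is the Claim_ definition above) =====
theorem preprocessCategory_spec : Claim_equal_preprocessCategory := by
  unfold Claim_equal_preprocessCategory
  intro cat_str _
  unfold Spec_preprocessCategory
  rw [A_eq, B_eq]
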